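-- pv_equiv track=rewrite | github.com/CadeReinberger/daft-day | ranking_model.py | get_team_players
-- ===== SOURCE A (Python) =====
-- def get_team_players(ranking, team):
--     #returns the team as a np-array to be fit to the model
--     players = [player for player in ranking if player[2] == team]
--     #first, get the quarterback
--     qbs = [player for player in players if player[1] == 'QB']
--     qb1 = sorted(qbs, key = lambda qb : qb[3])[0] if len(qbs) > 0 else None
--     qb1 = qb1[0] if not qb1 is None else None
--     #now, running back 1 adp
--     rbs = [player for player in players if player[1] == 'RB']
--     rb1 = sorted(rbs, key = lambda rb : rb[3])[0] if len(rbs) > 0 else None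
--     rb1 = rb1[0] if not rb1 is None else None
--     #running back 2
--     rbs = [player for player in players if player[1] == 'RB']
--     rb2 = sorted(rbs, key = lambda rb : rb[3])[1] if len(rbs) > 1 else None
--     rb2 = rb2[0] if not rb2 is None else None
--     #wide receiver 1
--     wrs = [player for player in players if player[1] == 'WR']
--     wr1 = sorted(wrs, key = lambda wr : wr[3])[0] if len(wrs) > 0 else None
--     wr1 = wr1[0] if not wr1 is None else None
--     #wide receiver 2
--     wrs = [player for player in players if player[1] == 'WR']
--     wr2 = sorted(wrs, key = lambda wr : wr[3])[1] if len(wrs) > 1 else None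
--     wr2 = wr2[0] if not wr2 is None else None
--     #return the result
--     return [qb1, rb1, rb2, wr1, wr2]
-- ===== SOURCE B (Python) =====
-- def get_team_players(ranking, team):
--     # One pass: keep the best QB and the top-two RB/WR (by ADP, ties -> earlier entry).
--     qb = None
--     rb1 = rb2 = None
--     wr1 = wr2 = None
--     for p in ranking:
--         if p[2] != team:
--             continue
--         pos = p[1]
--         if pos == 'QB':
--             if qb is None or p[3] < qb[3]:
--                 qb = p
--         elif pos == 'RB':
--             if rb1 is None:
--                 rb1 = p
--             elif p[3] < rb1[3]:
--                 rb1, rb2 = p, rb1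
--             elif rb2 is None or p[3] < rb2[3]:
--                 rb2 = p
--         elif pos == 'WR':
--             if wr1 is None:
--                 wr1 = p
--             elif p[3] < wr1[3]:
--                 wr1, wr2 = p, wr1
--             elif wr2 is None or p[3] < wr2[3]:
--                 wr2 = p
--     name = lambda x: None if x is None else x[0]
--     return [name(qb), name(rb1), name(rb2), name(wr1), name(wr2)]
-- ===== Notes on version B (the rewrite author's own statement) =====
-- stated objective: simpler
-- what changed: Replaced A's six filter-then-stable-sort passes (players filtered per position and sorted each time) by a single pass over ranking that keeps the best QB and the top-two RB/WR by ADP with ties going to the earlier entry.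
import Mathlib
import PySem

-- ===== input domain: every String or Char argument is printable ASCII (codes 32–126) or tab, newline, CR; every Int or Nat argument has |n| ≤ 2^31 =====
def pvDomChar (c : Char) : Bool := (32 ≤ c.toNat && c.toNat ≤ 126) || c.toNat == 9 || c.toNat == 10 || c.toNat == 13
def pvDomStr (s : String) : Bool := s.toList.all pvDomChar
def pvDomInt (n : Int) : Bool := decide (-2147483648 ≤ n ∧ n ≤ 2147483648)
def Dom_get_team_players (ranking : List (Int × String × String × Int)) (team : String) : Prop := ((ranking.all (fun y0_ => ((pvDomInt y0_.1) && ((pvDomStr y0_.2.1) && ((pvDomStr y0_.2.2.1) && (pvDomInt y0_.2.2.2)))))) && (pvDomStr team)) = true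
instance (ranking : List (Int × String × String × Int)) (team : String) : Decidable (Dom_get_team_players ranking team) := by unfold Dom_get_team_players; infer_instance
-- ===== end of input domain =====

-- B replaces A's six filter-then-sort passes by a single pass keeping the best QB and
-- the top-two RB/WR by ADP (objective: simpler; provably the same return value).

-- ===== PORT A =====
def get_team_players (ranking : List (Int × String × String × Int)) (team : String) : List (Option Int) :=
  let players := ranking.filter (fun player => player.2.2.1 == team)
  let qbs := players.filter (fun player => player.2.1 == "QB")
  let qb1 : Option (Int × String × String × Int) :=
    if qbs.length > 0 then PySem.List.pyGet? (PySem.List.sorted qbs (fun qb => qb.2.2.2)) 0 else none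
  let qb1 : Option Int := match qb1 with | some p => some p.1 | none => none
  let rbs := players.filter (fun player => player.2.1 == "RB")
  let rb1 : Option (Int × String × String × Int) :=
    if rbs.length > 0 then PySem.List.pyGet? (PySem.List.sorted rbs (fun rb => rb.2.2.2)) 0 else none
  let rb1 : Option Int := match rb1 with | some p => some p.1 | none => none
  let rbs := players.filter (fun player => player.2.1 == "RB")
  let rb2 : Option (Int × String × String × Int) :=
    if rbs.length > 1 then PySem.List.pyGet? (PySem.List.sorted rbs (fun rb => rb.2.2.2)) 1 else none
  let rb2 : Option Int := match rb2 with | some p => some p.1 | none => none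
  let wrs := players.filter (fun player => player.2.1 == "WR")
  let wr1 : Option (Int × String × String × Int) :=
    if wrs.length > 0 then PySem.List.pyGet? (PySem.List.sorted wrs (fun wr => wr.2.2.2)) 0 else none
  let wr1 : Option Int := match wr1 with | some p => some p.1 | none => none
  let wrs := players.filter (fun player => player.2.1 == "WR")
  let wr2 : Option (Int × String × String × Int) :=
    if wrs.length > 1 then PySem.List.pyGet? (PySem.List.sorted wrs (fun wr => wr.2.2.2)) 1 else none
  let wr2 : Option Int := match wr2 with | some p => some p.1 | none => none
  [qb1, rb1, rb2, wr1, wr2]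

-- ===== PORT B =====
-- keep the single best player so far (ADP, ties -> earlier)
def pvStep1 (s : Option (Int × String × String × Int)) (p : Int × String × String × Int) :
    Option (Int × String × String × Int) :=
  match s with
  | none => some p
  | some a => if p.2.2.2 < a.2.2.2 then some p else some a

-- keep the two best players so far (ADP, ties -> earlier)
def pvStep2 (s : Option (Int × String × String × Int) × Option (Int × String × String × Int))
    (p : Int × String × String × Int) :
    Option (Int × String × String × Int) × Option (Int × String × String × Int) :=
  match s with
  | (none, _) => (some p, none)
  | (some a, none) => if p.2.2.2 < a.2.2.2 then (some p, some a) else (some a, some p)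
  | (some a, some b) =>
      if p.2.2.2 < a.2.2.2 then (some p, some a)
      else if p.2.2.2 < b.2.2.2 then (some a, some p)
      else (some a, some b)

def get_team_players_alt (ranking : List (Int × String × String × Int)) (team : String) : List (Option Int) :=
  let st := ranking.foldl
    (fun s p =>
      if p.2.2.1 == team then
        if p.2.1 == "QB" then (pvStep1 s.1 p, s.2.1, s.2.2)
        else if p.2.1 == "RB" then (s.1, pvStep2 s.2.1 p, s.2.2)
        else if p.2.1 == "WR" then (s.1, s.2.1, pvStep2 s.2.2 p)
        else s
      else s)
    (none, (none, none), (none, none))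
  [st.1.map (·.1), st.2.1.1.map (·.1), st.2.1.2.map (·.1), st.2.2.1.map (·.1), st.2.2.2.map (·.1)]

-- ===== PRECONDITION & SPEC =====
def Spec_get_team_players (ranking : List (Int × String × String × Int)) (team : String) (out : List (Option Int)) : Prop := out = get_team_players_alt ranking team
instance (ranking : List (Int × String × String × Int)) (team : String) (out : List (Option Int)) : Decidable (Spec_get_team_players ranking team out) := by unfold Spec_get_team_players; infer_instance

-- ===== CLAIM (what is proved, stated in full; the proofs are below) =====
def Claim_equal_get_team_players : Prop := ∀ (ranking : List (Int × String × String × Int)) (team : String), Dom_get_team_players ranking team → Spec_get_team_players ranking team (get_team_players ranking team)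

-- ===== LEMMAS AND PROOFS =====

-- the insertion-sort order predicate used by PySem.List.sorted with key = ADP
def pvBefore (a b : Int × String × String × Int) : Bool := decide (a.2.2.2 < b.2.2.2)

lemma pvTop2_insertBy (s : List (Int × String × String × Int)) (x : Int × String × String × Int) :
    ((PySem.List.insertBy pvBefore x s).head?, (PySem.List.insertBy pvBefore x s)[1]?) =
      pvStep2 (s.head?, s[1]?) x := by
  match s with
  | [] => simp [PySem.List.insertBy, pvStep2]
  | [a] =>
      simp only [PySem.List.insertBy, pvBefore, pvStep2]
      split_ifs <;> simp_all
  | a :: b :: rest =>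
      simp only [PySem.List.insertBy, pvBefore, pvStep2]
      split_ifs <;> simp_all
      rw [if_neg (by omega), if_neg (by omega)]

lemma pvTop1_insertBy (s : List (Int × String × String × Int)) (x : Int × String × String × Int) :
    (PySem.List.insertBy pvBefore x s).head? = pvStep1 s.head? x := by
  match s with
  | [] => simp [PySem.List.insertBy, pvStep1]
  | a :: rest =>
      simp only [PySem.List.insertBy, pvBefore, pvStep1]
      split_ifs <;> simp_all

lemma pvSorted_append (l : List (Int × String × String × Int)) (x : Int × String × String × Int) :
    PySem.List.sorted (l ++ [x]) (fun p => p.2.2.2) false =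
      PySem.List.insertBy pvBefore x (PySem.List.sorted l (fun p => p.2.2.2) false) := by
  rw [PySem.List.sorted_eq_foldl_insertBy, PySem.List.sorted_eq_foldl_insertBy, List.foldl_append]
  rfl

lemma pvTop2_fold (l : List (Int × String × String × Int)) :
    l.foldl pvStep2 (none, none) =
      ((PySem.List.sorted l (fun p => p.2.2.2) false).head?,
       (PySem.List.sorted l (fun p => p.2.2.2) false)[1]?) := by
  induction l using List.reverseRecOn with
  | nil => rfl
  | append_singleton l x ih =>
      rw [List.foldl_append, List.foldl_cons, List.foldl_nil, ih, pvSorted_append, pvTop2_insertBy]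

lemma pvTop1_fold (l : List (Int × String × String × Int)) :
    l.foldl pvStep1 none = (PySem.List.sorted l (fun p => p.2.2.2) false).head? := by
  induction l using List.reverseRecOn with
  | nil => rfl
  | append_singleton l x ih =>
      rw [List.foldl_append, List.foldl_cons, List.foldl_nil, ih, pvSorted_append, pvTop1_insertBy]

-- the combined one-pass fold decomposes into three independent folds over the position filters
lemma pvFold_decompose (l : List (Int × String × String × Int)) (team : String)
    (q : Option (Int × String × String × Int))
    (r w : Option (Int × String × String × Int) × Option (Int × String × String × Int)) :
    l.foldl
      (fun s p =>
        if p.2.2.1 == team then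
          if p.2.1 == "QB" then (pvStep1 s.1 p, s.2.1, s.2.2)
          else if p.2.1 == "RB" then (s.1, pvStep2 s.2.1 p, s.2.2)
          else if p.2.1 == "WR" then (s.1, s.2.1, pvStep2 s.2.2 p)
          else s
        else s)
      (q, r, w) =
    (((l.filter (fun p => p.2.2.1 == team)).filter (fun p => p.2.1 == "QB")).foldl pvStep1 q,
     ((l.filter (fun p => p.2.2.1 == team)).filter (fun p => p.2.1 == "RB")).foldl pvStep2 r,
     ((l.filter (fun p => p.2.2.1 == team)).filter (fun p => p.2.1 == "WR")).foldl pvStep2 w) := by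
  induction l generalizing q r w with
  | nil => rfl
  | cons p l ih =>
      by_cases ht : p.2.2.1 == team
      · by_cases hq : p.2.1 == "QB"
        · have : (p.2.1 == "RB") = false := by simp_all
          have : (p.2.1 == "WR") = false := by simp_all
          simp_all
        · by_cases hr : p.2.1 == "RB"
          · have : (p.2.1 == "WR") = false := by simp_all
            simp_all
          · by_cases hw : p.2.1 == "WR" <;> simp_all
      · simp_all

lemma pvMatch (o : Option (Int × String × String × Int)) :
    (match o with | some p => some p.1 | none => (none : Option Int)) = o.map (·.1) := by
  cases o <;> rfl

-- A's guarded sorted-indexing equals head? / [1]? of the sorted list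
lemma pvA_get0 (l : List (Int × String × String × Int)) :
    (if l.length > 0 then PySem.List.pyGet? (PySem.List.sorted l (fun p => p.2.2.2) false) 0 else none) =
      (PySem.List.sorted l (fun p => p.2.2.2) false).head? := by
  by_cases h : l.length > 0
  · simp [h, PySem.List.pyGet?, PySem.List.pyIdx?, List.head?_eq_getElem?]
  · have : l = [] := by cases l <;> simp_all
    subst this; rfl

lemma pvA_get1 (l : List (Int × String × String × Int)) :
    (if l.length > 1 then PySem.List.pyGet? (PySem.List.sorted l (fun p => p.2.2.2) false) 1 else none) =
      (PySem.List.sorted l (fun p => p.2.2.2) false)[1]? := by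
  by_cases h : l.length > 1
  · simp [h, PySem.List.pyGet?, PySem.List.pyIdx?]
  · have hlen : (PySem.List.sorted l (fun p => p.2.2.2) false).length ≤ 1 := by
      rw [PySem.List.length_sorted]; omega
    rw [List.getElem?_eq_none hlen]; simp [h]

-- ===== VERDICT (by name: the statement is the Claim_ definition above) =====
theorem get_team_players_spec : Claim_equal_get_team_players := by
  intro ranking team _
  unfold Spec_get_team_players get_team_players get_team_players_alt
  rw [pvFold_decompose]
  simp only [pvTop1_fold, pvTop2_fold, pvA_get0, pvA_get1, pvMatch]
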